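-- pv_equiv track=rewrite | github.com/ThrudPrimrose/SC26-Layout-Artifacts | Microbenchmarks/Zekin_Loopnest/visualize_access.py | count_cachelines
-- ===== SOURCE A (Python) =====
-- def count_cachelines(warps, NP, NL, layout, cacheline_bytes=128, elem_bytes=4):
--     """Count unique cache lines touched by each warp and total."""
--     elems_per_cl = cacheline_bytes // elem_bytes
--     per_warp = []
--     all_cls = set()
--     for w in warps:
--         cls = set()
--         for (njc, njk, addr) in w["accesses"]:
--             cls.add(addr // elems_per_cl)
--         per_warp.append(len(cls))
--         all_cls.update(cls)
--     return per_warp, len(all_cls)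
-- ===== SOURCE B (Python) =====
-- def _distinct(xs):
--     """Number of distinct values: sort, then subtract adjacent duplicates."""
--     ys = sorted(xs)
--     return len(ys) - sum(1 for a, b in zip(ys, ys[1:]) if a == b)
--
--
-- def count_cachelines(warps, NP, NL, layout, cacheline_bytes=128, elem_bytes=4):
--     """Count unique cache lines touched by each warp and total."""
--     elems_per_cl = cacheline_bytes // elem_bytes
--     line_lists = [[addr // elems_per_cl for (njc, njk, addr) in w["accesses"]]
--                   for w in warps]
--     per_warp = [_distinct(lines) for lines in line_lists]
--     total = _distinct([x for lines in line_lists for x in lines])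
--     return per_warp, total
-- ===== Notes on version B (the rewrite author's own statement) =====
-- stated objective: alternative
-- what changed: Replaces hash-set deduplication entirely: B keeps plain lists of cache-line indices and counts distinct values by sorting and subtracting the number of equal adjacent pairs, computing the total on the flattened list instead of maintaining a running global set.
import Mathlib
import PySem

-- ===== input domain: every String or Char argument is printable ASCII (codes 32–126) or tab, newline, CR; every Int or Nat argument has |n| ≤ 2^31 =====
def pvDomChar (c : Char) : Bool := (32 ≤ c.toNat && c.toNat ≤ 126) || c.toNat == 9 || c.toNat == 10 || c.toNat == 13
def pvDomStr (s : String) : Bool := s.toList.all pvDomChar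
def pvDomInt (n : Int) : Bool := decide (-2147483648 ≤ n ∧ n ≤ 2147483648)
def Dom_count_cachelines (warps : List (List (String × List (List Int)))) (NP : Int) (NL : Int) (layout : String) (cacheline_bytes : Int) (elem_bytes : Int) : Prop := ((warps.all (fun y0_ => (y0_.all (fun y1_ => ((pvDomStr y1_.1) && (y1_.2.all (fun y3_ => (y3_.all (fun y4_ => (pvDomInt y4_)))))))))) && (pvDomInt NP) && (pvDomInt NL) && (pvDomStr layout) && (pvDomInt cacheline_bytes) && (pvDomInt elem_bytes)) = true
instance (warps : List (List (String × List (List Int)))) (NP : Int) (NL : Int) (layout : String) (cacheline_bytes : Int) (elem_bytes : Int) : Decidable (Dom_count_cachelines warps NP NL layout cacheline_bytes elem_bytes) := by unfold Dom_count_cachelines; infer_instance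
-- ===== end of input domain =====

-- B drops hash sets altogether: it counts distinct cache lines by sorting the list of line
-- indices and subtracting the number of equal adjacent pairs, with the total taken on the
-- flattened list (objective: alternative algorithm, same result).

-- ===== PORT A =====
def count_cachelines (warps : List (List (String × List (List Int)))) (NP : Int) (NL : Int) (layout : String) (cacheline_bytes : Int) (elem_bytes : Int) : List Int × Int :=
  let elems_per_cl := PySem.Int.floordiv cacheline_bytes elem_bytes
  -- for w in warps: build cls, append len(cls), all_cls.update(cls)
  let st := warps.foldl (fun (acc : List Int × PySem.Set Int) w =>
      let cls : PySem.Set Int :=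
        ((PySem.Dict.mk w).getD "accesses" []).foldl  -- w["accesses"]; KeyError excluded by Pre_
          (fun (cls : PySem.Set Int) a =>
            PySem.Set.add cls (PySem.Int.floordiv (PySem.List.pyGetD a 2 0) elems_per_cl))  -- addr = a[2]; length-3 unpack in Pre_
          PySem.Set.empty
      (acc.1 ++ [PySem.Set.len cls], PySem.Set.update acc.2 cls))
    ([], PySem.Set.empty)
  (st.1, PySem.Set.len st.2)

-- ===== PORT B =====
-- _distinct(xs): ys = sorted(xs); len(ys) - sum(1 for a, b in zip(ys, ys[1:]) if a == b)
def pvDistinct (xs : List Int) : Int :=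
  let ys := PySem.List.sorted xs (fun x => x) false
  PySem.List.len ys - ((ys.zip (PySem.List.slice ys (some 1))).countP (fun p => p.1 == p.2) : Int)

def count_cachelines_alt (warps : List (List (String × List (List Int)))) (NP : Int) (NL : Int) (layout : String) (cacheline_bytes : Int) (elem_bytes : Int) : List Int × Int :=
  let elems_per_cl := PySem.Int.floordiv cacheline_bytes elem_bytes
  -- line_lists = [[addr // elems_per_cl for (njc, njk, addr) in w["accesses"]] for w in warps]
  let line_lists : List (List Int) := warps.map (fun w =>
      ((PySem.Dict.mk w).getD "accesses" []).map
        (fun a => PySem.Int.floordiv (PySem.List.pyGetD a 2 0) elems_per_cl))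
  let per_warp := line_lists.map pvDistinct
  -- total = _distinct([x for lines in line_lists for x in lines])
  let total := pvDistinct line_lists.flatten
  (per_warp, total)

-- ===== PRECONDITION & SPEC =====
-- Pre_ excludes exactly the inputs on which Python A raises: elem_bytes = 0 (ZeroDivisionError),
-- a warp without an "accesses" key (KeyError), an access whose length is not 3 (unpack ValueError),
-- and elems_per_cl = 0 together with a nonempty access list (ZeroDivisionError at addr // elems_per_cl).
def Pre_count_cachelines (warps : List (List (String × List (List Int)))) (NP : Int) (NL : Int) (layout : String) (cacheline_bytes : Int) (elem_bytes : Int) : Prop :=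
  elem_bytes ≠ 0 ∧
  (∀ w ∈ warps, ((PySem.Dict.mk w).get? "accesses").isSome ∧
      ∀ a ∈ (PySem.Dict.mk w).getD "accesses" [], a.length = 3) ∧
  (PySem.Int.floordiv cacheline_bytes elem_bytes = 0 →
      ∀ w ∈ warps, (PySem.Dict.mk w).getD "accesses" [] = [])
instance (warps : List (List (String × List (List Int)))) (NP : Int) (NL : Int) (layout : String) (cacheline_bytes : Int) (elem_bytes : Int) : Decidable (Pre_count_cachelines warps NP NL layout cacheline_bytes elem_bytes) := by unfold Pre_count_cachelines; infer_instance

def pvWitness_count_cachelines : (List (List (String × List (List Int)))) × Int × Int × String × Int × Int :=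
  ([[("accesses", [[0, 1, 2], [0, 1, 33]])], [("accesses", [[1, 0, 2]])]], 2, 4, "flat", 128, 4)

def Spec_count_cachelines (warps : List (List (String × List (List Int)))) (NP : Int) (NL : Int) (layout : String) (cacheline_bytes : Int) (elem_bytes : Int) (out : List Int × Int) : Prop := out = count_cachelines_alt warps NP NL layout cacheline_bytes elem_bytes
instance (warps : List (List (String × List (List Int)))) (NP : Int) (NL : Int) (layout : String) (cacheline_bytes : Int) (elem_bytes : Int) (out : List Int × Int) : Decidable (Spec_count_cachelines warps NP NL layout cacheline_bytes elem_bytes out) := by unfold Spec_count_cachelines; infer_instance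

-- ===== CLAIM (what is proved, stated in full; the proofs are below) =====
def Claim_equal_count_cachelines : Prop := ∀ (warps : List (List (String × List (List Int)))) (NP : Int) (NL : Int) (layout : String) (cacheline_bytes : Int) (elem_bytes : Int), Dom_count_cachelines warps NP NL layout cacheline_bytes elem_bytes → Pre_count_cachelines warps NP NL layout cacheline_bytes elem_bytes → Spec_count_cachelines warps NP NL layout cacheline_bytes elem_bytes (count_cachelines warps NP NL layout cacheline_bytes elem_bytes)

-- ===== LEMMAS AND PROOFS =====

-- A's single loop with the two accumulators, phased: per-warp lens on the left, a union fold on the right.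
theorem pv_fold_phase {α : Type} (g : α → PySem.Set Int) (l : List α) (p : List Int) (s : PySem.Set Int) :
    l.foldl (fun (acc : List Int × PySem.Set Int) w =>
        (acc.1 ++ [PySem.Set.len (g w)], PySem.Set.update acc.2 (g w))) (p, s)
    = (p ++ l.map (fun w => PySem.Set.len (g w)),
       l.foldl (fun t w => PySem.Set.update t (g w)) s) := by
  induction l generalizing p s with
  | nil => simp
  | cons h t ih => rw [List.foldl_cons, ih]; simp

-- updating with a deduplicated list adds the same elements in the same order
theorem pv_update_ofList (s : PySem.Set Int) (l : List Int) :
    PySem.Set.update s (PySem.Set.ofList l) = PySem.Set.update s l := by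
  rw [PySem.Set.update_eq_append_filter, PySem.Set.update_eq_append_filter,
    PySem.Set.ofList_ofList]

-- folding update over the blocks builds the set of the flattened list
theorem pv_fold_update (ls : List (List Int)) (s : PySem.Set Int) :
    ls.foldl (fun t l => PySem.Set.update t l) s = PySem.Set.update s ls.flatten := by
  induction ls generalizing s with
  | nil => simp [PySem.Set.update]
  | cons h t ih => rw [List.foldl_cons, ih, List.flatten_cons, PySem.Set.update_append]

-- removing a member of a nodup list shortens it by one
theorem pv_discard_len_mem (s : PySem.Set Int) (a : Int) (hnd : s.Nodup) (hm : a ∈ s) :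
    (PySem.Set.discard s a).length + 1 = s.length := by
  have h1 : PySem.Set.discard s a = s.erase a := by
    rw [List.Nodup.erase_eq_filter hnd]; rfl
  rw [h1, List.length_erase_of_mem hm]
  have := List.length_pos_of_mem hm
  omega

-- discarding a non-member is the identity
theorem pv_discard_not_mem (s : PySem.Set Int) (a : Int) (hm : a ∉ s) :
    PySem.Set.discard s a = s := by
  apply List.filter_eq_self.mpr
  intro x hx
  simp only [Bool.not_eq_true', beq_eq_false_iff_ne, ne_eq]
  rintro rfl; exact hm hx

-- in a ≤-sorted list, #distinct + #equal-adjacent-pairs = length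
theorem pv_sorted_count (ys : List Int) (h : ys.Pairwise (· ≤ ·)) :
    (PySem.Set.ofList ys).length + (ys.zip ys.tail).countP (fun p => p.1 == p.2) = ys.length := by
  induction ys with
  | nil => simp
  | cons a t ih =>
    have hle : ∀ x ∈ t, a ≤ x := (List.pairwise_cons.mp h).1
    have ht := (List.pairwise_cons.mp h).2
    rw [PySem.Set.ofList_cons]
    cases t with
    | nil => simp [PySem.Set.discard]
    | cons b t' =>
      have ihv := ih ht
      have hzip : ((a :: b :: t').zip (a :: b :: t').tail).countP (fun p => p.1 == p.2)
          = ((b :: t').zip (b :: t').tail).countP (fun p => p.1 == p.2)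
            + (if a = b then 1 else 0) := by
        simp only [List.tail_cons, List.zip_cons_cons, List.countP_cons]
        by_cases hab : a = b <;> simp [hab]
      by_cases hab : a = b
      · subst hab
        have hmem : a ∈ PySem.Set.ofList (a :: t') := by
          rw [PySem.Set.mem_ofList]; exact List.mem_cons_self
        have hlen := pv_discard_len_mem _ a (PySem.Set.nodup_ofList _) hmem
        rw [hzip, if_pos rfl]
        simp only [List.length_cons] at *
        omega
      · have hanot : a ∉ PySem.Set.ofList (b :: t') := by
          rw [PySem.Set.mem_ofList]
          intro hmem
          have hba : b ≤ a := by
            rcases List.mem_cons.mp hmem with rfl | hx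
            · exact le_refl a
            · exact ((List.pairwise_cons.mp ht).1 a hx)
          exact hab (le_antisymm (hle b List.mem_cons_self) hba)
        rw [pv_discard_not_mem _ _ hanot]
        simp only [List.length_cons, hzip, if_neg hab] at *
        omega

-- sorting does not change the member set or its size
theorem pv_ofList_sorted_length (l : List Int) :
    (PySem.Set.ofList (PySem.List.sorted l (fun x => x) false)).length
      = (PySem.Set.ofList l).length := by
  apply List.Perm.length_eq
  apply (List.perm_ext_iff_of_nodup (PySem.Set.nodup_ofList _) (PySem.Set.nodup_ofList _)).mpr
  intro x
  rw [PySem.Set.mem_ofList, PySem.Set.mem_ofList, PySem.List.mem_sorted]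

-- the sort-and-scan distinct counter computes the size of set(l)
theorem pv_distinct_eq (l : List Int) :
    pvDistinct l = PySem.Set.len (PySem.Set.ofList l) := by
  simp only [pvDistinct, PySem.Set.len]
  have hp : (PySem.List.sorted l (fun x => x) false).Pairwise (· ≤ ·) := by
    have := PySem.List.sorted_pairwise (xs := l) (key := fun x => x)
    simpa using this
  have hc := pv_sorted_count _ hp
  rw [PySem.List.slice_from _ (by omega)]
  have hlen : PySem.List.len (PySem.List.sorted l (fun x => x) false)
      = ((PySem.List.sorted l (fun x => x) false).length : Int) := by
    simp [PySem.List.len_eq]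
  rw [hlen]
  have htail : (PySem.List.sorted l (fun x => x) false).drop (Int.toNat 1)
      = (PySem.List.sorted l (fun x => x) false).tail := by
    simp [List.drop_one]
  rw [htail]
  rw [← pv_ofList_sorted_length l]
  omega

-- a per-warp set built by repeated add is set of the mapped list
theorem pv_cls_eq (acc : List (List Int)) (f : List Int → Int) :
    acc.foldl (fun (cls : PySem.Set Int) a => PySem.Set.add cls (f a)) PySem.Set.empty
      = PySem.Set.ofList (acc.map f) := by
  rw [← PySem.Set.update_map_eq_foldl_add, PySem.Set.update_empty]

-- ===== VERDICT (by name: the statement is the Claim_ definition above) =====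
theorem count_cachelines_spec : Claim_equal_count_cachelines := by
  intro warps NP NL layout cb eb _ _
  unfold Spec_count_cachelines
  dsimp only [count_cachelines, count_cachelines_alt]
  rw [pv_fold_phase (fun w =>
        ((PySem.Dict.mk w).getD "accesses" []).foldl
          (fun cls a => PySem.Set.add cls (PySem.Int.floordiv (PySem.List.pyGetD a 2 0)
            (PySem.Int.floordiv cb eb))) PySem.Set.empty)]
  refine Prod.ext ?_ ?_
  · simp only [List.nil_append, List.map_map]
    apply List.map_congr_left
    intro w _
    simp only [Function.comp]
    rw [pv_cls_eq, pv_distinct_eq, PySem.Set.len]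
  · simp only []
    have : warps.foldl (fun t w => PySem.Set.update t
        (((PySem.Dict.mk w).getD "accesses" []).foldl
          (fun cls a => PySem.Set.add cls (PySem.Int.floordiv (PySem.List.pyGetD a 2 0)
            (PySem.Int.floordiv cb eb))) PySem.Set.empty)) PySem.Set.empty
        = (warps.map (fun w => ((PySem.Dict.mk w).getD "accesses" []).map
            (fun a => PySem.Int.floordiv (PySem.List.pyGetD a 2 0)
              (PySem.Int.floordiv cb eb)))).foldl (fun t l => PySem.Set.update t l)
            PySem.Set.empty := by
      rw [List.foldl_map]
      apply PySem.List.foldl_congr_mem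
      intro acc w _
      rw [pv_cls_eq, pv_update_ofList]
    rw [this, pv_fold_update, PySem.Set.update_empty, pv_distinct_eq]
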